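-- pv_equiv track=rewrite | github.com/brayan832015/Elementos_de_Computacion | Cuadernos/contar_elementos_lista.py | cuente_todos
-- ===== SOURCE A (Python) =====
-- def cuente_todos(lista):
--     resultado=0 #variable para contar la cantidad de números.
--     lista_1=str(lista) #pasar la lista a string para calcular su longitud.
--     sustituir='[' #sustituir son los caracteres que no suman al resultado.
--     sustituir_2=']'
--     sustituir_3=','
--     sustituir_4=' '
--     for fila in range(len(lista_1)):
--         if lista_1[fila]!=sustituir and lista_1[fila]!=sustituir_2 and lista_1[fila]!=sustituir_3 and lista_1[fila]!=sustituir_4: #si el dígito evaluado es diferente a todos los de sustituir se suma uno a resultado.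
--            resultado+=1
--     return resultado
-- ===== SOURCE B (Python) =====
-- def cuente_todos(lista):
--     s = str(lista)
--     return len(s) - s.count('[') - s.count(']') - s.count(',') - s.count(' ')
-- ===== Notes on version B (the rewrite author's own statement) =====
-- stated objective: faster
-- what changed: Replaces the explicit per-character index loop with a four-way branch by a single complement computation, total length minus the counts of each delimiter via C-level str.count, removing the Python-level loop.
import Mathlib
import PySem

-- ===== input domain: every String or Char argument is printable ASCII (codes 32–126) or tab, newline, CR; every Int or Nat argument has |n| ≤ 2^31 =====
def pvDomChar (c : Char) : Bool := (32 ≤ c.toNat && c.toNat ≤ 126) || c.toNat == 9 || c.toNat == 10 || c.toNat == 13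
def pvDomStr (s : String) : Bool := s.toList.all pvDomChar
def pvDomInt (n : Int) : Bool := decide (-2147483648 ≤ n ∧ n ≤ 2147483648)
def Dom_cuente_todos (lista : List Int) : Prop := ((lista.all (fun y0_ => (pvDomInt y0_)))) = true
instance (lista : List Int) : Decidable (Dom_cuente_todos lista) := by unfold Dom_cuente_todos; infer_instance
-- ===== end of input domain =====

-- B computes len(str(lista)) minus the counts of the four delimiter characters instead of
-- looping over indices with a four-way branch; objective: simpler.

-- shared helper: Python's str(lista) for a list of ints, as a List Char
-- (= '[' + ", ".join(str(x) for x in lista) + ']'; exact for int lists)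
def pyStrList (lista : List Int) : List Char :=
  '[' :: (PySem.Chars.join [',', ' '] (lista.map PySem.Int.toChars) ++ [']'])

-- ===== PORT A =====
def cuente_todos (lista : List Int) : Int :=
  let resultado : Int := 0
  let lista_1 := pyStrList lista
  let sustituir := '['
  let sustituir_2 := ']'
  let sustituir_3 := ','
  let sustituir_4 := ' '
  (PySem.List.pyRange 0 (PySem.List.len lista_1)).foldl
    (fun resultado fila =>
      let c := PySem.List.pyGetD lista_1 fila ' '
      if c != sustituir && c != sustituir_2 && c != sustituir_3 && c != sustituir_4 then
        resultado + 1
      else resultado)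
    resultado

-- ===== PORT B =====
def cuente_todos_alt (lista : List Int) : Int :=
  let s := pyStrList lista
  (s.length : Int) - PySem.Chars.count s ['['] - PySem.Chars.count s [']']
    - PySem.Chars.count s [','] - PySem.Chars.count s [' ']

-- ===== PRECONDITION & SPEC =====
def Spec_cuente_todos (lista : List Int) (out : Int) : Prop := out = cuente_todos_alt lista
instance (lista : List Int) (out : Int) : Decidable (Spec_cuente_todos lista out) := by unfold Spec_cuente_todos; infer_instance

-- ===== CLAIM (what is proved, stated in full; the proofs are below) =====
def Claim_equal_cuente_todos : Prop := ∀ (lista : List Int), Dom_cuente_todos lista → Spec_cuente_todos lista (cuente_todos lista)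

-- ===== LEMMAS AND PROOFS =====

-- Chars.count with a single-character pattern is the plain element count (fuel ≥ length)
theorem chars_count_go_singleton (c : Char) :
    ∀ (fuel : Nat) (s : List Char) (acc : Nat), s.length ≤ fuel →
      PySem.Chars.count.go [c] fuel s acc = acc + s.count c := by
  intro fuel
  induction fuel with
  | zero =>
    intro s acc h
    have : s = [] := List.length_eq_zero_iff.mp (Nat.le_zero.mp h)
    subst this
    simp [PySem.Chars.count.go]
  | succ n ih =>
    intro s acc h
    cases s with
    | nil => simp [PySem.Chars.count.go]
    | cons x t =>
      simp only [PySem.Chars.count.go]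
      by_cases hx : x = c
      · subst hx
        simp only [List.isPrefixOf, BEq.rfl, Bool.true_and, if_true]
        rw [show [x].length = 1 from rfl, List.drop_one, List.tail_cons,
          ih t (acc + 1) (by simpa using h)]
        simp
        omega
      · have : ([c].isPrefixOf (x :: t)) = false := by
          simp [List.isPrefixOf]
          exact fun hcx => (hx hcx.symm).elim
        rw [this]
        simp only [if_false, Bool.false_eq_true]
        rw [ih t acc (by simpa using h)]
        simp [List.count_cons, (by simpa using hx : ¬ x == c)]

theorem chars_count_singleton (s : List Char) (c : Char) :
    PySem.Chars.count s [c] = s.count c := by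
  simp only [PySem.Chars.count, List.isEmpty]
  exact (chars_count_go_singleton c s.length s 0 le_rfl).trans (Nat.zero_add _)

-- Core identity: counting the non-delimiter characters equals length minus the delimiter counts
theorem countP_eq_len_sub (s : List Char) :
    ((s.countP (fun c => c != '[' && c != ']' && c != ',' && c != ' ')) : Int)
      = (s.length : Int) - s.count '[' - s.count ']' - s.count ',' - s.count ' ' := by
  induction s with
  | nil => simp
  | cons x t ih =>
    simp only [List.countP_cons, List.count_cons, List.length_cons]
    by_cases h1 : x = '[' <;> by_cases h2 : x = ']' <;> by_cases h3 : x = ',' <;>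
      by_cases h4 : x = ' ' <;>
      simp_all <;> omega

theorem cuente_todos_eq (lista : List Int) :
    cuente_todos lista = cuente_todos_alt lista := by
  unfold cuente_todos cuente_todos_alt
  rw [PySem.List.foldl_pyRange_pyGetD (pyStrList lista) ' '
      (fun acc c => if c != '[' && c != ']' && c != ',' && c != ' ' then acc + 1 else acc)
      (0 : Int) (le_refl 0)]
  simp only [Int.toNat_zero, List.drop_zero]
  rw [PySem.List.foldl_if_add_one]
  rw [chars_count_singleton, chars_count_singleton, chars_count_singleton, chars_count_singleton]
  have := countP_eq_len_sub (pyStrList lista)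
  simp only [Bool.and_assoc] at this ⊢
  omega

-- ===== VERDICT (by name: the statement is the Claim_ definition above) =====
theorem cuente_todos_spec : Claim_equal_cuente_todos := by
  intro lista _
  unfold Spec_cuente_todos
  exact cuente_todos_eq lista
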